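-- pv_equiv track=rewrite | github.com/fgartland4/skillable-intelligence | backend/routes/prospector_routes.py | _pick_academic_contact
-- ===== SOURCE A (Python) =====
-- _ACADEMIC_CONTACT_KEYWORDS = ("faculty", "curriculum", "dean", "professor", "chair",
--                                "director", "ed tech", "edtech", "learning technology")
--
-- def _pick_academic_contact(contacts: list) -> dict | None:
--     """Prefer Faculty / CDD / Dean contacts over generic decision_maker."""
--     for kw in _ACADEMIC_CONTACT_KEYWORDS:
--         match = next(
--             (c for c in contacts if kw in (c.get("title") or "").lower()),
--             None,
--         )
--         if match:
--             return match
--     return contacts[0] if contacts else None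
-- ===== SOURCE B (Python) =====
-- _ACADEMIC_CONTACT_KEYWORDS = ("faculty", "curriculum", "dean", "professor", "chair",
--                                "director", "ed tech", "edtech", "learning technology")
--
-- def _pick_academic_contact(contacts: list) -> dict | None:
--     """Single pass: keep the first contact with the smallest keyword-priority index."""
--     n = len(_ACADEMIC_CONTACT_KEYWORDS)
--     best = None
--     best_p = n
--     for c in contacts:
--         title = (c.get("title") or "").lower()
--         p = next((i for i, kw in enumerate(_ACADEMIC_CONTACT_KEYWORDS) if kw in title), n)
--         if p < best_p:
--             best, best_p = c, p
--     if best is not None: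
--         return best
--     return contacts[0] if contacts else None
-- ===== Notes on version B (the rewrite author's own statement) =====
-- stated objective: alternative
-- what changed: A scans the whole contact list once per keyword (keyword-major, up to 9 passes with early return); B makes a single contact-major pass keeping the first contact whose smallest matching-keyword index is strictly minimal, then falls back to contacts[0].
import Mathlib
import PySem

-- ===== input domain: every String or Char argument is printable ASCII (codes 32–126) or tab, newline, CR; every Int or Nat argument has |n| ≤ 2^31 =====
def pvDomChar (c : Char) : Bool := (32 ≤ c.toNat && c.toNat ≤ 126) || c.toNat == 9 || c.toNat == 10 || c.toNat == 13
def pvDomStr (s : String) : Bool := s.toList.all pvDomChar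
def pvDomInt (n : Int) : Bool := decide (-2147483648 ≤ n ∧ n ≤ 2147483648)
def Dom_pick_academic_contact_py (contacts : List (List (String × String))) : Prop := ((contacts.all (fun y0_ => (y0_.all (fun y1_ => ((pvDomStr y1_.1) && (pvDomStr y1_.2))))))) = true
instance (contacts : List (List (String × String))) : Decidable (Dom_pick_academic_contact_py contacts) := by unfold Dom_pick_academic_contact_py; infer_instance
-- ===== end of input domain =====

-- B replaces A's keyword-major double scan by a single pass over contacts that keeps
-- the first contact with the smallest matching-keyword index (objective: alternative).


-- shared module constant _ACADEMIC_CONTACT_KEYWORDS and the title test 'kw in (c.get("title") or "").lower()'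
def pvKwList : List String :=
  ["faculty", "curriculum", "dean", "professor", "chair",
   "director", "ed tech", "edtech", "learning technology"]

def pvMatches (c : List (String × String)) (kw : String) : Bool :=
  PySem.Str.isIn kw (PySem.Str.lower (((PySem.Dict.mk c).get? "title").getD ""))

-- ===== PORT A =====
-- outer loop 'for kw in _ACADEMIC_CONTACT_KEYWORDS' with early return; 'if match:' is the
-- Python truthiness test (None or empty dict falls through to the next keyword)
def pvGoA (contacts : List (List (String × String))) :
    List String → Option (List (String × String))
  | [] => contacts.head?          -- return contacts[0] if contacts else None
  | kw :: rest =>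
    match contacts.find? (fun c => pvMatches c kw) with
    | some m => if m = [] then pvGoA contacts rest else some m
    | none => pvGoA contacts rest

def pick_academic_contact_py (contacts : List (List (String × String))) : Option (List (String × String)) :=
  pvGoA contacts pvKwList

-- ===== PORT B =====
-- priority of one contact: index of the first keyword contained in its lowered title, or n
def pvPrio (c : List (String × String)) : Nat :=
  pvKwList.findIdx (fun kw => pvMatches c kw)

def pick_academic_contact_py_alt (contacts : List (List (String × String))) : Option (List (String × String)) :=
  let n := pvKwList.length
  let r := contacts.foldl
    (fun (st : Option (List (String × String)) × Nat) c =>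
      let p := pvPrio c
      if p < st.2 then (some c, p) else st)
    (none, n)
  match r.1 with
  | some best => some best
  | none => contacts.head?

-- ===== PRECONDITION & SPEC =====
def Spec_pick_academic_contact_py (contacts : List (List (String × String))) (out : Option (List (String × String))) : Prop := out = pick_academic_contact_py_alt contacts
instance (contacts : List (List (String × String))) (out : Option (List (String × String))) : Decidable (Spec_pick_academic_contact_py contacts out) := by unfold Spec_pick_academic_contact_py; infer_instance

-- ===== CLAIM (what is proved, stated in full; the proofs are below) =====
def Claim_equal_pick_academic_contact_py : Prop := ∀ (contacts : List (List (String × String))), Dom_pick_academic_contact_py contacts → Spec_pick_academic_contact_py contacts (pick_academic_contact_py contacts)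

-- ===== LEMMAS AND PROOFS =====

-- running minimum of f over a list, started at a
def pvMF {α : Type} (f : α → Nat) (a : Nat) (cs : List α) : Nat :=
  cs.foldl (fun r c => min r (f c)) a

theorem pvMF_le_init {α : Type} (f : α → Nat) (a : Nat) (cs : List α) :
    pvMF f a cs ≤ a := by
  induction cs generalizing a with
  | nil => simp [pvMF]
  | cons c cs ih =>
    calc pvMF f (min a (f c)) cs ≤ min a (f c) := ih _
    _ ≤ a := Nat.min_le_left _ _

theorem pvMF_le_of_mem {α : Type} (f : α → Nat) {cs : List α} {c : α}
    (h : c ∈ cs) : ∀ a, pvMF f a cs ≤ f c := by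
  induction cs with
  | nil => cases h
  | cons d cs ih =>
    intro a
    rcases List.mem_cons.mp h with rfl | h'
    · show pvMF f (min a (f c)) cs ≤ f c
      exact le_trans (pvMF_le_init _ _ _) (Nat.min_le_right _ _)
    · exact ih h' _

theorem pvMF_attained {α : Type} (f : α → Nat) (a : Nat) (cs : List α) :
    pvMF f a cs = a ∨ ∃ c ∈ cs, f c = pvMF f a cs := by
  induction cs generalizing a with
  | nil => exact Or.inl rfl
  | cons c cs ih =>
    have hrw : pvMF f a (c :: cs) = pvMF f (min a (f c)) cs := rfl
    rw [hrw]
    rcases ih (min a (f c)) with h | ⟨d, hd, hfd⟩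
    · rcases Nat.le_total a (f c) with hle | hle
      · exact Or.inl (by rw [h, Nat.min_eq_left hle])
      · exact Or.inr ⟨c, List.mem_cons_self, by rw [h, Nat.min_eq_right hle]⟩
    · exact Or.inr ⟨d, List.mem_cons_of_mem _ hd, hfd⟩

theorem pvMF_succ {α : Type} (f g : α → Nat) (a : Nat) (cs : List α)
    (h : ∀ c ∈ cs, f c = g c + 1) :
    pvMF f (a + 1) cs = pvMF g a cs + 1 := by
  induction cs generalizing a with
  | nil => rfl
  | cons c cs ih =>
    show pvMF f (min (a + 1) (f c)) cs = pvMF g (min a (g c)) cs + 1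
    rw [h c List.mem_cons_self, Nat.succ_min_succ]
    exact ih _ (fun d hd => h d (List.mem_cons_of_mem _ hd))

theorem pvFind?_congr_mem {α : Type} {p q : α → Bool} (cs : List α)
    (h : ∀ c ∈ cs, p c = q c) : cs.find? p = cs.find? q := by
  induction cs with
  | nil => rfl
  | cons c cs ih =>
    have hc := h c List.mem_cons_self
    have ih' := ih (fun d hd => h d (List.mem_cons_of_mem _ hd))
    cases hpc : p c with
    | true =>
      rw [List.find?_cons_of_pos hpc, List.find?_cons_of_pos (hc ▸ hpc)]
    | false =>
      rw [List.find?_cons_of_neg (by simp [hpc]),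
          List.find?_cons_of_neg (by simp [← hc, hpc]), ih']

-- B's fold computes (first contact with the running-minimum priority, that minimum)
theorem pvB_fold (cs : List (List (String × String)))
    (b0 : Option (List (String × String))) (p0 : Nat) :
    cs.foldl (fun (st : Option (List (String × String)) × Nat) c =>
        let p := pvPrio c
        if p < st.2 then (some c, p) else st) (b0, p0)
      = ((if pvMF pvPrio p0 cs < p0
            then cs.find? (fun c => pvPrio c == pvMF pvPrio p0 cs) else b0),
         pvMF pvPrio p0 cs) := by
  induction cs generalizing b0 p0 with
  | nil => simp [pvMF]
  | cons c cs ih =>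
    have hm : pvMF pvPrio p0 (c :: cs) = pvMF pvPrio (min p0 (pvPrio c)) cs := rfl
    rw [hm, List.foldl_cons]
    show List.foldl _ (if pvPrio c < p0 then (some c, pvPrio c) else (b0, p0)) cs = _
    by_cases hp : pvPrio c < p0
    · rw [Nat.min_eq_right (Nat.le_of_lt hp), if_pos hp, ih]
      have hle : pvMF pvPrio (pvPrio c) cs ≤ pvPrio c := pvMF_le_init _ _ _
      have hlt : pvMF pvPrio (pvPrio c) cs < p0 := Nat.lt_of_le_of_lt hle hp
      rw [if_pos hlt]
      simp only [Prod.mk.injEq]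
      refine ⟨?_, trivial⟩
      rcases Nat.lt_or_eq_of_le hle with hlt' | heq
      · rw [if_pos hlt', List.find?_cons_of_neg (by simp; omega)]
      · rw [if_neg (by omega), List.find?_cons_of_pos (by simp [heq])]
    · rw [Nat.min_eq_left (Nat.le_of_not_lt hp), if_neg hp, ih]
      by_cases hm2 : pvMF pvPrio p0 cs < p0
      · rw [if_pos hm2, if_pos hm2]
        simp only [Prod.mk.injEq]
        refine ⟨?_, trivial⟩
        rw [List.find?_cons_of_neg (by simp; omega)]
      · rw [if_neg hm2, if_neg hm2]

-- A's keyword-major loop also returns the first contact with the minimal keyword index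
theorem pvA_go (kws : List String) (cs : List (List (String × String)))
    (hmt : ∀ kw ∈ kws, pvMatches [] kw = false) :
    pvGoA cs kws
      = (if pvMF (fun c => kws.findIdx (fun kw => pvMatches c kw)) kws.length cs < kws.length
           then cs.find? (fun c =>
             kws.findIdx (fun kw => pvMatches c kw)
               == pvMF (fun c => kws.findIdx (fun kw => pvMatches c kw)) kws.length cs)
           else cs.head?) := by
  induction kws with
  | nil =>
    simp [pvGoA]
  | cons kw rest ih =>
    have hstep : ∀ c, List.findIdx (fun k => pvMatches c k) (kw :: rest)
        = if pvMatches c kw then 0 else List.findIdx (fun k => pvMatches c k) rest + 1 := by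
      intro c; rw [List.findIdx_cons]; cases h : pvMatches c kw <;> simp
    show (match cs.find? (fun c => pvMatches c kw) with
          | some m => if m = [] then pvGoA cs rest else some m
          | none => pvGoA cs rest) = _
    cases hfind : cs.find? (fun c => pvMatches c kw) with
    | some m =>
      have hmm : pvMatches m kw = true := by
        have := List.find?_some hfind; simpa using this
      have hmem : m ∈ cs := List.mem_of_find?_eq_some hfind
      have hne : m ≠ [] := by
        intro h; rw [h, hmt kw List.mem_cons_self] at hmm; cases hmm
      simp only [if_neg hne]
      have hprio : List.findIdx (fun k => pvMatches m k) (kw :: rest) = 0 := by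
        rw [hstep]; simp [hmm]
      have hm0 : pvMF (fun c => List.findIdx (fun k => pvMatches c k) (kw :: rest))
          (kw :: rest).length cs = 0 :=
        Nat.le_zero.mp (hprio ▸ pvMF_le_of_mem _ hmem _)
      have hcong : cs.find? (fun c =>
            List.findIdx (fun k => pvMatches c k) (kw :: rest)
              == pvMF (fun c => List.findIdx (fun k => pvMatches c k) (kw :: rest))
                   (kw :: rest).length cs)
          = cs.find? (fun c => pvMatches c kw) :=
        pvFind?_congr_mem cs (fun c _ => by
          rw [hm0, hstep c]
          cases h : pvMatches c kw
          · simp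
          · simp)
      rw [hcong, hfind, if_pos (by rw [hm0]; simp)]
    | none =>
      have hnone : ∀ c ∈ cs, pvMatches c kw = false := by
        intro c hc
        simpa using List.find?_eq_none.mp hfind c hc
      rw [ih (fun k hk => hmt k (List.mem_cons_of_mem _ hk))]
      have hsucc : pvMF (fun c => List.findIdx (fun k => pvMatches c k) (kw :: rest))
          (kw :: rest).length cs
          = pvMF (fun c => List.findIdx (fun k => pvMatches c k) rest) rest.length cs + 1 := by
        show pvMF _ (rest.length + 1) cs = _
        exact pvMF_succ _ _ _ _ (fun c hc => by rw [hstep c, if_neg (by simp [hnone c hc])])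
      rw [hsucc]
      set m' := pvMF (fun c => List.findIdx (fun k => pvMatches c k) rest) rest.length cs with hm'
      by_cases hlt : m' < rest.length
      · rw [if_pos hlt, if_pos (by simp only [List.length_cons]; omega)]
        exact pvFind?_congr_mem cs (fun c hc => by
          rw [hstep c, if_neg (by simp [hnone c hc])]
          simp)
      · rw [if_neg hlt, if_neg (by simp only [List.length_cons]; omega)]

-- ===== VERDICT (by name: the statement is the Claim_ definition above) =====
theorem pick_academic_contact_py_spec : Claim_equal_pick_academic_contact_py := by
  intro contacts _
  show pick_academic_contact_py contacts = pick_academic_contact_py_alt contacts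
  have hmt : ∀ kw ∈ pvKwList, pvMatches [] kw = false := by decide
  have hfun : ∀ c : List (String × String),
      List.findIdx (fun kw => pvMatches c kw) pvKwList = pvPrio c := fun _ => rfl
  have hA := pvA_go pvKwList contacts hmt
  simp only [hfun] at hA
  have hB := pvB_fold contacts none pvKwList.length
  unfold pick_academic_contact_py pick_academic_contact_py_alt
  rw [hA]
  simp only [hB]
  set m := pvMF pvPrio pvKwList.length contacts with hm
  by_cases hlt : m < pvKwList.length
  · rw [if_pos hlt, if_pos hlt]
    rcases pvMF_attained pvPrio pvKwList.length contacts with h | ⟨c, hc, hfc⟩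
    · rw [← hm] at h; omega
    · have hs : (contacts.find? (fun c => pvPrio c == m)).isSome := by
        rw [List.find?_isSome]; exact ⟨c, hc, beq_iff_eq.mpr hfc⟩
      cases hf : contacts.find? (fun c => pvPrio c == m) with
      | none => rw [hf] at hs; cases hs
      | some b => rfl
  · rw [if_neg hlt, if_neg hlt]
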